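-- pv_equiv track=rewrite | github.com/crmcustoms/autopilot-content | scripts/planfix_to_blog.py | inject_illustrations
-- ===== SOURCE A (Python) =====
-- def inject_illustrations(sections, urls):
--     """Вставляє ілюстрації після 2-го і 4-го heading блоків (якщо є)."""
--     if not urls:
--         return sections
--     # Позиції всіх heading-секцій (крім першої — вона йде одразу після обкладинки)
--     heading_positions = [i for i, s in enumerate(sections) if s.get('type') == 'heading']
--     insert_targets = heading_positions[1:]  # після 2-го heading, 4-го heading тощо
--     result = list(sections)
--     offset = 0
--     for url, pos in zip(urls, insert_targets):
--         result.insert(pos + offset, {'type': 'image', 'text': url})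
--         offset += 1
--     return result
-- ===== SOURCE B (Python) =====
-- def inject_illustrations(sections, urls):
--     """Вставляє ілюстрації після 2-го і 4-го heading блоків (якщо є)."""
--     if not urls:
--         return sections
--     result = []
--     it = iter(urls)
--     seen_heading = False
--     for s in sections:
--         if s.get('type') == 'heading':
--             if seen_heading:
--                 url = next(it, None)
--                 if url is not None:
--                     result.append({'type': 'image', 'text': url})
--             seen_heading = True
--         result.append(s)
--     return result
-- ===== Notes on version B (the rewrite author's own statement) =====
-- stated objective: simpler
-- what changed: Replaced A's precomputed heading-position index list with its [1:] slice and the offset-adjusted list.insert loop by a single pass over sections that appends an image (consuming the next url) before each heading after the first.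
import Mathlib
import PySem

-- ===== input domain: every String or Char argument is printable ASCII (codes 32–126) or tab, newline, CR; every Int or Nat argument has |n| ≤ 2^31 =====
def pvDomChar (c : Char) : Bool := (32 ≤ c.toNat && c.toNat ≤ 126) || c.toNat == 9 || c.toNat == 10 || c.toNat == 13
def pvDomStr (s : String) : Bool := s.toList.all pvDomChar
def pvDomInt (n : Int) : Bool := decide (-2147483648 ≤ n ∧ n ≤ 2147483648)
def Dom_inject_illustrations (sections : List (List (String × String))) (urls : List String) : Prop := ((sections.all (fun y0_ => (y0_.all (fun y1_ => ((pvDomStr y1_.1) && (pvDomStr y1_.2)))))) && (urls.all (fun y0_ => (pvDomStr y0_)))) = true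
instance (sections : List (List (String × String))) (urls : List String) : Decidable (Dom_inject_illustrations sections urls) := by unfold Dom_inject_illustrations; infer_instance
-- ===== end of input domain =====

-- B replaces A's heading-position index list + offset bookkeeping by one pass with a
-- "seen a heading" flag (objective: simpler decomposition; return value proved equal).

-- ===== PORT A =====
-- {'type': 'image', 'text': url}
def pvImg (u : String) : List (String × String) := [("type", "image"), ("text", u)]

-- s.get('type') == 'heading'  (dict lookup = first match on the association list)
def pvIsHeading (s : List (String × String)) : Bool := s.lookup "type" == some "heading"

-- one step of A's `for url, pos in zip(urls, insert_targets)` loop (state: result, offset)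
def pvInsStep (st : List (List (String × String)) × Int) (p : String × Int) :
    List (List (String × String)) × Int :=
  (PySem.List.insert st.1 (p.2 + st.2) (pvImg p.1), st.2 + 1)

def inject_illustrations (sections : List (List (String × String))) (urls : List String) :
    List (List (String × String)) :=
  if urls = [] then sections
  else
    let heading_positions :=
      ((PySem.List.enumerate sections 0).filter (fun p => pvIsHeading p.2)).map Prod.fst
    let insert_targets := heading_positions.drop 1   -- heading_positions[1:]
    ((urls.zip insert_targets).foldl pvInsStep (sections, 0)).1

-- ===== PORT B =====
-- B's loop: consume sections once, emitting an image (taking the next url) before every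
-- heading except the first; `seen` is the seen_heading flag, `urls` the unconsumed urls.
def pvAltGo (sections : List (List (String × String))) (urls : List String) (seen : Bool) :
    List (List (String × String)) :=
  match sections with
  | [] => []
  | s :: rest =>
    if pvIsHeading s then
      if seen then
        match urls with
        | u :: us => pvImg u :: s :: pvAltGo rest us true
        | [] => s :: pvAltGo rest [] true
      else s :: pvAltGo rest urls true
    else s :: pvAltGo rest urls seen

def inject_illustrations_alt (sections : List (List (String × String))) (urls : List String) :
    List (List (String × String)) :=
  if urls = [] then sections else pvAltGo sections urls false

-- ===== PRECONDITION & SPEC =====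
def Spec_inject_illustrations (sections : List (List (String × String))) (urls : List String) (out : List (List (String × String))) : Prop := out = inject_illustrations_alt sections urls
instance (sections : List (List (String × String))) (urls : List String) (out : List (List (String × String))) : Decidable (Spec_inject_illustrations sections urls out) := by unfold Spec_inject_illustrations; infer_instance

-- ===== CLAIM (what is proved, stated in full; the proofs are below) =====
def Claim_equal_inject_illustrations : Prop := ∀ (sections : List (List (String × String))) (urls : List String), Dom_inject_illustrations sections urls → Spec_inject_illustrations sections urls (inject_illustrations sections urls)

-- ===== LEMMAS AND PROOFS =====

-- heading positions of `sections`, relative to its own start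
def pvPosns (sections : List (List (String × String))) : List Int :=
  match sections with
  | [] => []
  | s :: r => if pvIsHeading s then 0 :: (pvPosns r).map (· + 1) else (pvPosns r).map (· + 1)

-- A's insert loop as a structural recursion
def pvInsFold (res : List (List (String × String))) (pairs : List (String × Int)) (off : Int) :
    List (List (String × String)) :=
  match pairs with
  | [] => res
  | (u, p) :: ps => pvInsFold (PySem.List.insert res (p + off) (pvImg u)) ps (off + 1)

theorem pv_foldl_eq_insFold (pairs : List (String × Int)) (res : List (List (String × String)))
    (off : Int) : (pairs.foldl pvInsStep (res, off)).1 = pvInsFold res pairs off := by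
  induction pairs generalizing res off with
  | nil => rfl
  | cons p ps ih => cases p; simp [List.foldl, pvInsStep, pvInsFold, ih]

theorem pv_enum_posns (r : List (List (String × String))) (i : Int) :
    ((PySem.List.enumerate r i).filter (fun p => pvIsHeading p.2)).map Prod.fst
      = (pvPosns r).map (· + i) := by
  induction r generalizing i with
  | nil => simp [PySem.List.enumerate_nil, pvPosns]
  | cons s rest ih =>
    rw [PySem.List.enumerate_cons]
    by_cases h : pvIsHeading s
    · rw [List.filter_cons_of_pos (by simpa using h)]
      simp only [List.map_cons, ih, pvPosns, if_pos h, List.map_map]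
      refine List.cons_eq_cons.2 ⟨by omega, List.map_congr_left (fun p _ => ?_)⟩
      show p + (i + 1) = p + 1 + i
      omega
    · rw [List.filter_cons_of_neg (by simpa using h)]
      simp only [ih, pvPosns, if_neg h, List.map_map]
      refine List.map_congr_left (fun p _ => ?_)
      show p + (i + 1) = p + 1 + i
      omega

theorem pv_posns_nonneg (r : List (List (String × String))) :
    ∀ p ∈ pvPosns r, 0 ≤ p := by
  induction r with
  | nil => simp [pvPosns]
  | cons s rest ih =>
    intro p hp
    simp only [pvPosns] at hp
    split at hp
    · rcases List.mem_cons.1 hp with rfl | hp'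
      · omega
      · obtain ⟨q, hq, rfl⟩ := List.mem_map.1 hp'
        have := ih q hq; omega
    · obtain ⟨q, hq, rfl⟩ := List.mem_map.1 hp
      have := ih q hq; omega

theorem pv_insert_cons_pos {α : Type} (x : α) (xs : List α) (n : Int) (v : α) (h : 1 ≤ n) :
    PySem.List.insert (x :: xs) n v = x :: PySem.List.insert xs (n - 1) v := by
  simp only [PySem.List.insert, PySem.List.sliceIndices]
  have hn : ¬ n < 0 := by omega
  have hn1 : ¬ n - 1 < 0 := by omega
  simp only [if_neg hn, if_neg hn1, if_neg (by norm_num : ¬ (1:Int) < 0)]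
  simp only [List.length_cons]
  have key : (min n ((xs.length : Int) + 1)).toNat = (min (n - 1) (xs.length : Int)).toNat + 1 := by
    omega
  push_cast at key ⊢
  rw [key]
  simp [List.take_succ_cons, List.drop_succ_cons]

theorem pv_peel (pairs : List (String × Int)) (x : List (String × String))
    (res : List (List (String × String))) (off : Int)
    (h : ∀ up ∈ pairs, 1 ≤ up.2 + off) :
    pvInsFold (x :: res) pairs off
      = x :: pvInsFold res (pairs.map (fun up => (up.1, up.2 - 1))) off := by
  induction pairs generalizing res off with
  | nil => rfl
  | cons up ps ih =>
    obtain ⟨u, p⟩ := up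
    have h1 : 1 ≤ p + off := h (u, p) (by simp)
    simp only [pvInsFold, List.map_cons]
    rw [pv_insert_cons_pos _ _ _ _ h1]
    have he : p + off - 1 = p - 1 + off := by omega
    rw [he]
    exact ih _ _ (fun q hq => by have := h q (by simp [hq]); omega)

theorem pv_shift (pairs : List (String × Int)) (res : List (List (String × String)))
    (off c : Int) :
    pvInsFold res (pairs.map (fun up => (up.1, up.2 + c))) off = pvInsFold res pairs (off + c) := by
  induction pairs generalizing res off with
  | nil => rfl
  | cons up ps ih =>
    obtain ⟨u, p⟩ := up
    simp only [List.map_cons, pvInsFold]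
    have h1 : p + c + off = p + (off + c) := by omega
    have h2 : off + 1 + c = off + c + 1 := by omega
    rw [h1, ih, h2]

theorem pv_altGo_nil (s : List (List (String × String))) (b : Bool) : pvAltGo s [] b = s := by
  induction s generalizing b with
  | nil => rfl
  | cons x r ih =>
    simp only [pvAltGo]
    by_cases h : pvIsHeading x
    · cases b <;> simp [h, ih]
    · simp [h, ih]

-- zip with shifted positions, written as a map over the plain zip
theorem pv_zip_map_snd (us : List String) (ps : List Int) (f : Int → Int) :
    us.zip (ps.map f) = (us.zip ps).map (fun up => (up.1, f up.2)) := by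
  rw [List.zip_map_right]
  exact List.map_congr_left (fun p _ => rfl)

-- the two shift maps cancel
theorem pv_map_cancel (l : List (String × Int)) :
    (l.map (fun up => (up.1, up.2 + 1))).map (fun up => (up.1, up.2 - 1)) = l := by
  rw [List.map_map]
  refine (List.map_congr_left (fun p _ => ?_)).trans (List.map_id _)
  show ((p.1, p.2 + 1 - 1) : String × Int) = id p
  simp

theorem pv_zip_posns_cond (us : List String) (rest : List (List (String × String))) (off : Int)
    (hoff : 1 ≤ off) : ∀ up ∈ us.zip (pvPosns rest), 1 ≤ up.2 + off := by
  intro up hup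
  have := pv_posns_nonneg rest up.2 (List.of_mem_zip hup).2
  omega

theorem pv_zip_posns_shift_cond (us : List String) (rest : List (List (String × String)))
    (off : Int) (hoff : 0 ≤ off) :
    ∀ up ∈ (us.zip (pvPosns rest)).map (fun up => (up.1, up.2 + 1)), 1 ≤ up.2 + off := by
  intro up hup
  obtain ⟨q, hq, rfl⟩ := List.mem_map.1 hup
  have := pv_posns_nonneg rest q.2 (List.of_mem_zip hq).2
  show 1 ≤ q.2 + 1 + off
  omega

theorem pv_main2 (sections : List (List (String × String))) (urls : List String) :
    pvInsFold sections (urls.zip (pvPosns sections)) 0 = pvAltGo sections urls true := by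
  induction sections generalizing urls with
  | nil => simp [pvPosns, pvInsFold, pvAltGo]
  | cons s rest ih =>
    by_cases h : pvIsHeading s
    · cases urls with
      | nil => simp [pvInsFold, pvAltGo, h, pv_altGo_nil]
      | cons u us =>
        simp only [pvAltGo, h, if_true]
        simp only [pvPosns, if_pos h, List.zip_cons_cons, pvInsFold, add_zero, zero_add,
          PySem.List.insert_zero, pv_zip_map_snd]
        rw [pv_peel _ _ _ _ (pv_zip_posns_shift_cond us rest 1 (by omega))]
        rw [pv_map_cancel]
        rw [pv_peel _ _ _ _ (pv_zip_posns_cond us rest 1 (by omega))]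
        have hm : (us.zip (pvPosns rest)).map (fun up => ((up.1 : String), up.2 - 1))
            = (us.zip (pvPosns rest)).map (fun up => (up.1, up.2 + (-1))) :=
          List.map_congr_left (fun p _ => by
            show ((p.1, p.2 - 1) : String × Int) = (p.1, p.2 + (-1)); simp; omega)
        rw [hm, pv_shift]
        norm_num [ih]
    · simp only [pvAltGo, h, Bool.false_eq_true, if_false]
      simp only [pvPosns, if_neg h, pv_zip_map_snd]
      rw [pv_peel _ _ _ _ (pv_zip_posns_shift_cond urls rest 0 (by omega))]
      rw [pv_map_cancel, ih]

theorem pv_main1 (sections : List (List (String × String))) (urls : List String) :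
    pvInsFold sections (urls.zip ((pvPosns sections).drop 1)) 0 = pvAltGo sections urls false := by
  induction sections generalizing urls with
  | nil => simp [pvPosns, pvInsFold, pvAltGo]
  | cons s rest ih =>
    by_cases h : pvIsHeading s
    · simp only [pvAltGo, h, if_true, Bool.false_eq_true, if_false]
      simp only [pvPosns, if_pos h, List.drop_succ_cons, List.drop_zero, pv_zip_map_snd]
      rw [pv_peel _ _ _ _ (pv_zip_posns_shift_cond urls rest 0 (by omega))]
      rw [pv_map_cancel, pv_main2]
    · simp only [pvAltGo, h, Bool.false_eq_true, if_false]
      simp only [pvPosns, if_neg h, ← List.map_drop, pv_zip_map_snd]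
      have hcond : ∀ up ∈ (urls.zip ((pvPosns rest).drop 1)).map (fun up => (up.1, up.2 + 1)),
          1 ≤ up.2 + (0 : Int) := by
        intro up hup
        obtain ⟨q, hq, rfl⟩ := List.mem_map.1 hup
        have := pv_posns_nonneg rest q.2 (List.mem_of_mem_drop (List.of_mem_zip hq).2)
        show 1 ≤ q.2 + 1 + 0
        omega
      rw [pv_peel _ _ _ _ hcond]
      rw [pv_map_cancel, ih]

-- ===== VERDICT (by name: the statement is the Claim_ definition above) =====
theorem inject_illustrations_spec : Claim_equal_inject_illustrations := by
  intro sections urls _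
  unfold Spec_inject_illustrations inject_illustrations inject_illustrations_alt
  by_cases hu : urls = []
  · simp [hu]
  · simp only [hu, if_false]
    rw [pv_foldl_eq_insFold]
    rw [pv_enum_posns]
    have hz : (pvPosns sections).map (· + 0) = pvPosns sections :=
      (List.map_congr_left (fun p _ => by show p + 0 = id p; simp)).trans (List.map_id _)
    rw [hz]
    exact pv_main1 sections urls
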